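-- pv_equiv track=rewrite | github.com/victorwu88/LeetcodeDailyChallenge | 1793 Maximum Score of a Good Subarray.py | maximumScore
-- ===== SOURCE A (Python) =====
-- def maximumScore(nums, k) -> int:
--
--     left, right = [], []
--     minn = nums[k]
--     for i in range(k, -1, -1):
--         minn = min(minn, nums[i])
--         left.append(minn)
--
--     minn = nums[k]
--     for i in range(k, len(nums)):
--         minn = min(minn, nums[i])
--         right.append(minn)
--
--     res = 0
--     i, j = 0, len(nums) - 1
--
--     while left and right:
--         res = max(res, (j - i + 1) * min(left[-1], right[-1]))
--
--         if left[-1] < right[-1]: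
--             left.pop()
--             i += 1
--
--         else:
--             right.pop()
--             j -= 1
--
--     return res
--
-- nums = [1,4,3,7,4,5]
--
-- k = 3
-- ===== SOURCE B (Python) =====
-- def maximumScore(nums, k) -> int:
--     # Exhaustive scan: for every window [i, j] containing k, score = len * min.
--     n = len(nums)
--     best = 0
--     for i in range(k + 1):
--         mn = min(nums[i:k + 1])
--         for j in range(k, n):
--             mn = min(mn, nums[j])
--             best = max(best, mn * (j - i + 1))
--     return best
-- ===== Notes on version B (the rewrite author's own statement) =====
-- stated objective: simpler
-- what changed: Replaces the prefix-min arrays and the outside-in two-pointer greedy shrink with a direct exhaustive scan over all windows [i,j] containing k, keeping a running window minimum.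
import Mathlib
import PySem

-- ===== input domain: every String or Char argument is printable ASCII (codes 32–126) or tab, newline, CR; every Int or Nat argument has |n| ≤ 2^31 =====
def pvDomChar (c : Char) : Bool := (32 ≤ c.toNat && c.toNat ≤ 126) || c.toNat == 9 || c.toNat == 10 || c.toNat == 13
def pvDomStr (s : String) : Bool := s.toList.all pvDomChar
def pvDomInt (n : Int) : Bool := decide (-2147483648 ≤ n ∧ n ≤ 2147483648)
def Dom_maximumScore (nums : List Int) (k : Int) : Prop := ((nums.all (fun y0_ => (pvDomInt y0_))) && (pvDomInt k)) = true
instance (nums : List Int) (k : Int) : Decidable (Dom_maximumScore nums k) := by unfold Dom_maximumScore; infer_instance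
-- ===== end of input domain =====

-- B replaces A's prefix-min arrays + two-pointer greedy shrink by an exhaustive scan of
-- all windows containing k with a running minimum (a simpler algorithm, not a faster one).

-- ===== PORT A =====
-- the 'while left and right' loop of A (res' is Python's res after the max update;
-- left[-1]/right[-1] are written out instead of being named)
def loopA (left right : List Int) (res i j : Int) : Int :=
  if h : left ≠ [] ∧ right ≠ [] then
    if left.getLastD 0 < right.getLastD 0 then
      loopA left.dropLast right
        (max res ((j - i + 1) * min (left.getLastD 0) (right.getLastD 0))) (i + 1) j
    else
      loopA left right.dropLast
        (max res ((j - i + 1) * min (left.getLastD 0) (right.getLastD 0))) i (j - 1)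
  else res
termination_by left.length + right.length
decreasing_by
  · have h1 : left ≠ [] := h.1
    have h2 : 0 < left.length := List.length_pos_iff.mpr h1
    simp [List.length_dropLast]; omega
  · have h1 : right ≠ [] := h.2
    have h2 : 0 < right.length := List.length_pos_iff.mpr h1
    simp [List.length_dropLast]; omega

def maximumScore (nums : List Int) (k : Int) : Int :=
  let minn := (PySem.List.pyGet? nums k).getD 0
  let sl := (PySem.List.pyRange k (-1) (-1)).foldl
      (fun (st : Int × List Int) i =>
        let m := min st.1 ((PySem.List.pyGet? nums i).getD 0)
        (m, st.2 ++ [m])) (minn, ([] : List Int))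
  let sr := (PySem.List.pyRange k (nums.length : Int) 1).foldl
      (fun (st : Int × List Int) i =>
        let m := min st.1 ((PySem.List.pyGet? nums i).getD 0)
        (m, st.2 ++ [m])) (minn, ([] : List Int))
  loopA sl.2 sr.2 0 0 ((nums.length : Int) - 1)

-- ===== PORT B =====
def maximumScore_alt (nums : List Int) (k : Int) : Int :=
  (PySem.List.pyRange 0 (k + 1) 1).foldl
    (fun best i =>
      let mn0 := (PySem.List.min? (PySem.List.slice nums (some i) (some (k + 1))) (fun x => x)).getD 0
      ((PySem.List.pyRange k (nums.length : Int) 1).foldl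
        (fun (st : Int × Int) j =>
          let m := min st.1 ((PySem.List.pyGet? nums j).getD 0)
          (m, max st.2 (m * (j - i + 1)))) (mn0, best)).2)
    0

-- ===== PRECONDITION & SPEC =====
-- exactly the inputs where A's nums[k] does not raise IndexError (negative k wraps in Python)
def Pre_maximumScore (nums : List Int) (k : Int) : Prop := PySem.Raise.InRange nums.length k
instance (nums : List Int) (k : Int) : Decidable (Pre_maximumScore nums k) := by unfold Pre_maximumScore; infer_instance
def pvWitness_maximumScore : List Int × Int := ([1, 4, 3, 7, 4, 5], 3)

def Spec_maximumScore (nums : List Int) (k : Int) (out : Int) : Prop := out = maximumScore_alt nums k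
instance (nums : List Int) (k : Int) (out : Int) : Decidable (Spec_maximumScore nums k out) := by unfold Spec_maximumScore; infer_instance

-- ===== CLAIM (what is proved, stated in full; the proofs are below) =====
def Claim_equal_maximumScore : Prop := ∀ (nums : List Int) (k : Int), Dom_maximumScore nums k → Pre_maximumScore nums k → Spec_maximumScore nums k (maximumScore nums k)

-- ===== LEMMAS AND PROOFS =====

-- min of nums[i..K] (indices read with getD; only used for i ≤ K < |nums|)
def lmin (nums : List Int) (K i : Nat) : Int :=
  if _h : i < K then min (nums.getD i 0) (lmin nums K (i + 1)) else nums.getD K 0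
termination_by K - i

-- min of nums[K..j]
def rmin (nums : List Int) (K j : Nat) : Int :=
  if _h : K < j then min (rmin nums K (j - 1)) (nums.getD j 0) else nums.getD K 0

-- score of window [i, j] (for i ≤ K ≤ j)
def score (nums : List Int) (K i j : Nat) : Int :=
  ((j : Int) - (i : Int) + 1) * min (lmin nums K i) (rmin nums K j)

-- max of score i j' over K ≤ j' ≤ j
def colmax (nums : List Int) (K i j : Nat) : Int :=
  if _h : K < j then max (colmax nums K i (j - 1)) (score nums K i j) else score nums K i K

-- max of score i' j over i ≤ i' ≤ K
def rowmax (nums : List Int) (K i j : Nat) : Int :=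
  if _h : i < K then max (score nums K i j) (rowmax nums K (i + 1) j) else score nums K K j
termination_by K - i

-- max of score over the whole rectangle [i..K] × [K..j]
def M (nums : List Int) (K i j : Nat) : Int :=
  if _h : i < K then max (colmax nums K i j) (M nums K (i + 1) j) else colmax nums K K j
termination_by K - i

def leftList (nums : List Int) (K i : Nat) : List Int :=
  ((List.range' i (K + 1 - i)).map (lmin nums K)).reverse

def rightList (nums : List Int) (K j : Nat) : List Int :=
  (List.range' K (j + 1 - K)).map (rmin nums K)

lemma lmin_K (nums : List Int) (K : Nat) : lmin nums K K = nums.getD K 0 := by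
  rw [lmin]; simp

lemma rmin_K (nums : List Int) (K : Nat) : rmin nums K K = nums.getD K 0 := by
  rw [rmin]; simp

lemma lmin_le_succ (nums : List Int) (K i : Nat) : lmin nums K i ≤ lmin nums K (i + 1) := by
  rw [lmin]
  split
  · exact min_le_right _ _
  · rename_i h
    rw [lmin, dif_neg (by omega : ¬ i + 1 < K)]

lemma lmin_mono (nums : List Int) (K : Nat) {i i' : Nat} (h : i ≤ i') :
    lmin nums K i ≤ lmin nums K i' := by
  induction i' with
  | zero => have : i = 0 := by omega
            rw [this]
  | succ n ih =>
    rcases (by omega : i ≤ n ∨ i = n + 1) with h1 | h1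
    · exact le_trans (ih h1) (lmin_le_succ nums K n)
    · rw [h1]

lemma rmin_succ_le (nums : List Int) (K j : Nat) : rmin nums K (j + 1) ≤ rmin nums K j := by
  rw [rmin]
  split
  · rename_i h
    simp only [Nat.add_sub_cancel]
    exact min_le_left _ _
  · rename_i h
    rw [rmin, dif_neg (by omega : ¬ K < j)]

lemma rmin_anti (nums : List Int) (K : Nat) {j j' : Nat} (h : j' ≤ j) :
    rmin nums K j ≤ rmin nums K j' := by
  induction j with
  | zero => have : j' = 0 := by omega
            rw [this]
  | succ n ih =>
    rcases (by omega : j' ≤ n ∨ j' = n + 1) with h1 | h1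
    · exact le_trans (rmin_succ_le nums K n) (ih h1)
    · rw [h1]

lemma rmin_le_base (nums : List Int) (K j : Nat) : rmin nums K j ≤ nums.getD K 0 := by
  rcases (by omega : K ≤ j ∨ j < K) with h | h
  · exact le_trans (rmin_anti nums K h) (le_of_eq (rmin_K nums K))
  · rw [rmin, dif_neg (by omega : ¬ K < j)]

-- pointwise greedy bounds
lemma score_col_bound (nums : List Int) (K : Nat) {i j j' : Nat}
    (hiK : i ≤ K) (hKj' : K ≤ j') (hj' : j' ≤ j)
    (hlt : lmin nums K i < rmin nums K j) :
    score nums K i j' ≤ max (score nums K i j) 0 := by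
  have h1 : rmin nums K j ≤ rmin nums K j' := rmin_anti nums K hj'
  have h2 : lmin nums K i < rmin nums K j' := lt_of_lt_of_le hlt h1
  rw [score, score, min_eq_left (le_of_lt h2), min_eq_left (le_of_lt hlt)]
  rcases (by omega : lmin nums K i ≤ 0 ∨ 0 < lmin nums K i) with ha | ha
  · have hlen : (0 : Int) ≤ (j' : Int) - (i : Int) + 1 := by omega
    exact le_trans (mul_nonpos_of_nonneg_of_nonpos hlen ha) (le_max_right _ _)
  · have hlen2 : ((j' : Int) - (i : Int) + 1) ≤ ((j : Int) - (i : Int) + 1) := by omega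
    exact le_trans (mul_le_mul_of_nonneg_right hlen2 (le_of_lt ha)) (le_max_left _ _)

lemma score_row_bound (nums : List Int) (K : Nat) {i i' j : Nat}
    (hii' : i ≤ i') (hi'K : i' ≤ K) (hKj : K ≤ j)
    (hle : rmin nums K j ≤ lmin nums K i) :
    score nums K i' j ≤ max (score nums K i j) 0 := by
  have h1 : lmin nums K i ≤ lmin nums K i' := lmin_mono nums K hii'
  have h2 : rmin nums K j ≤ lmin nums K i' := le_trans hle h1
  rw [score, score, min_eq_right h2, min_eq_right hle]
  rcases (by omega : rmin nums K j ≤ 0 ∨ 0 < rmin nums K j) with hb | hb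
  · have hlen : (0 : Int) ≤ (j : Int) - (i' : Int) + 1 := by omega
    exact le_trans (mul_nonpos_of_nonneg_of_nonpos hlen hb) (le_max_right _ _)
  · have hlen2 : ((j : Int) - (i' : Int) + 1) ≤ ((j : Int) - (i : Int) + 1) := by omega
    exact le_trans (mul_le_mul_of_nonneg_right hlen2 (le_of_lt hb)) (le_max_left _ _)

lemma colmax_le (nums : List Int) (K : Nat) {i j : Nat} {C : Int} (hKj : K ≤ j)
    (h : ∀ j', K ≤ j' → j' ≤ j → score nums K i j' ≤ C) : colmax nums K i j ≤ C := by
  revert hKj h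
  induction j using Nat.strong_induction_on with
  | _ j IH =>
    intro hKj h
    rw [colmax]
    split
    · rename_i hlt
      refine max_le (IH (j - 1) (by omega) (by omega) ?_) (h j hKj (le_refl j))
      exact fun j' a b => h j' a (by omega)
    · exact h K (le_refl K) hKj

lemma le_colmax (nums : List Int) (K : Nat) {i j j' : Nat} (hKj' : K ≤ j') (hj' : j' ≤ j) :
    score nums K i j' ≤ colmax nums K i j := by
  revert hj'
  induction j using Nat.strong_induction_on with
  | _ j IH =>
    intro hj'
    rw [colmax]
    split
    · rename_i hlt
      rcases Nat.eq_or_lt_of_le hj' with he | hlt2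
      · rw [he]
        exact le_max_right _ _
      · exact le_trans (IH (j - 1) (by omega) (by omega)) (le_max_left _ _)
    · rename_i hge
      have he : j' = K := by omega
      rw [he]

lemma rowmax_le (nums : List Int) (K : Nat) {i j : Nat} {C : Int} (hiK : i ≤ K)
    (h : ∀ i', i ≤ i' → i' ≤ K → score nums K i' j ≤ C) : rowmax nums K i j ≤ C := by
  have H : ∀ m : Nat, ∀ i : Nat, K - i = m → i ≤ K →
      (∀ i', i ≤ i' → i' ≤ K → score nums K i' j ≤ C) → rowmax nums K i j ≤ C := by
    intro m
    induction m using Nat.strong_induction_on with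
    | _ m IH =>
      intro i hm hiK h
      rw [rowmax]
      split
      · rename_i hlt
        exact max_le (h i (le_refl i) hiK)
          (IH (K - (i + 1)) (by omega) (i + 1) rfl (by omega) (fun i' a b => h i' (by omega) b))
      · rename_i hge
        exact h K hiK (le_refl K)
  exact H (K - i) i rfl hiK h

lemma le_rowmax (nums : List Int) (K : Nat) {i i' j : Nat} (hii' : i ≤ i') (hi'K : i' ≤ K) :
    score nums K i' j ≤ rowmax nums K i j := by
  have H : ∀ m : Nat, ∀ i : Nat, K - i = m → i ≤ i' → score nums K i' j ≤ rowmax nums K i j := by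
    intro m
    induction m using Nat.strong_induction_on with
    | _ m IH =>
      intro i hm hii'
      rw [rowmax]
      split
      · rename_i hlt
        rcases (by omega : i = i' ∨ i < i') with he | hlt2
        · rw [he]
          exact le_max_left _ _
        · exact le_trans (IH (K - (i + 1)) (by omega) (i + 1) rfl (by omega)) (le_max_right _ _)
      · rename_i hge
        have he : i' = K := by omega
        rw [he]
  exact H (K - i) i rfl hii'

lemma M_le (nums : List Int) (K : Nat) {i j : Nat} {C : Int} (hiK : i ≤ K)
    (h : ∀ i', i ≤ i' → i' ≤ K → colmax nums K i' j ≤ C) : M nums K i j ≤ C := by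
  have H : ∀ m : Nat, ∀ i : Nat, K - i = m → i ≤ K →
      (∀ i', i ≤ i' → i' ≤ K → colmax nums K i' j ≤ C) → M nums K i j ≤ C := by
    intro m
    induction m using Nat.strong_induction_on with
    | _ m IH =>
      intro i hm hiK h
      rw [M]
      split
      · rename_i hlt
        exact max_le (h i (le_refl i) hiK)
          (IH (K - (i + 1)) (by omega) (i + 1) rfl (by omega) (fun i' a b => h i' (by omega) b))
      · rename_i hge
        exact h K hiK (le_refl K)
  exact H (K - i) i rfl hiK h

lemma le_M (nums : List Int) (K : Nat) {i i' j : Nat} (hii' : i ≤ i') (hi'K : i' ≤ K) :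
    colmax nums K i' j ≤ M nums K i j := by
  have H : ∀ m : Nat, ∀ i : Nat, K - i = m → i ≤ i' → colmax nums K i' j ≤ M nums K i j := by
    intro m
    induction m using Nat.strong_induction_on with
    | _ m IH =>
      intro i hm hii'
      rw [M]
      split
      · rename_i hlt
        rcases (by omega : i = i' ∨ i < i') with he | hlt2
        · rw [he]
          exact le_max_left _ _
        · exact le_trans (IH (K - (i + 1)) (by omega) (i + 1) rfl (by omega)) (le_max_right _ _)
      · rename_i hge
        have he : i' = K := by omega
        rw [he]
  exact H (K - i) i rfl hii'

lemma M_split_row (nums : List Int) (K : Nat) {i j : Nat} (hiK : i ≤ K) (hKj : K < j) :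
    M nums K i j = max (M nums K i (j - 1)) (rowmax nums K i j) := by
  have H : ∀ m : Nat, ∀ i : Nat, K - i = m → i ≤ K →
      M nums K i j = max (M nums K i (j - 1)) (rowmax nums K i j) := by
    intro m
    induction m using Nat.strong_induction_on with
    | _ m IH =>
      intro i hm hiK
      by_cases hlt : i < K
      · have e1 : M nums K i j = max (colmax nums K i j) (M nums K (i + 1) j) := by
          rw [M, dif_pos hlt]
        have e2 : colmax nums K i j = max (colmax nums K i (j - 1)) (score nums K i j) := by
          rw [colmax, dif_pos hKj]
        have e3 : M nums K (i + 1) j = max (M nums K (i + 1) (j - 1)) (rowmax nums K (i + 1) j) :=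
          IH (K - (i + 1)) (by omega) (i + 1) rfl (by omega)
        have e4 : M nums K i (j - 1) = max (colmax nums K i (j - 1)) (M nums K (i + 1) (j - 1)) := by
          rw [M, dif_pos hlt]
        have e5 : rowmax nums K i j = max (score nums K i j) (rowmax nums K (i + 1) j) := by
          rw [rowmax, dif_pos hlt]
        rw [e1, e2, e3, e4, e5, max_max_max_comm]
      · have he : i = K := by omega
        rw [he]
        have e1 : M nums K K j = colmax nums K K j := by
          rw [M, dif_neg (lt_irrefl K)]
        have e2 : colmax nums K K j = max (colmax nums K K (j - 1)) (score nums K K j) := by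
          rw [colmax, dif_pos hKj]
        have e4 : M nums K K (j - 1) = colmax nums K K (j - 1) := by
          rw [M, dif_neg (lt_irrefl K)]
        have e5 : rowmax nums K K j = score nums K K j := by
          rw [rowmax, dif_neg (lt_irrefl K)]
        rw [e1, e2, e4, e5]
  exact H (K - i) i rfl hiK

-- structure of the two stacks
lemma leftList_ne (nums : List Int) (K i : Nat) (hiK : i ≤ K) : leftList nums K i ≠ [] := by
  intro hcon
  have := congrArg List.length hcon
  simp [leftList] at this
  omega

lemma rightList_ne (nums : List Int) (K j : Nat) (hKj : K ≤ j) : rightList nums K j ≠ [] := by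
  intro hcon
  have := congrArg List.length hcon
  simp [rightList] at this
  omega

lemma leftList_last (nums : List Int) (K i : Nat) (hiK : i ≤ K) :
    (leftList nums K i).getLastD 0 = lmin nums K i := by
  unfold leftList
  rw [show K + 1 - i = (K - i) + 1 by omega, List.range'_succ, List.map_cons,
    List.reverse_cons, List.getLastD_concat]

lemma leftList_drop (nums : List Int) (K i : Nat) (hiK : i ≤ K) :
    (leftList nums K i).dropLast = leftList nums K (i + 1) := by
  unfold leftList
  rw [show K + 1 - i = (K - i) + 1 by omega, List.range'_succ, List.map_cons,
    List.reverse_cons, List.dropLast_concat, show K - i = K + 1 - (i + 1) by omega]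

lemma rightList_last (nums : List Int) (K j : Nat) (hKj : K ≤ j) :
    (rightList nums K j).getLastD 0 = rmin nums K j := by
  unfold rightList
  rw [show j + 1 - K = (j - K) + 1 by omega, List.range'_1_concat]
  simp [show K + (j - K) = j by omega]

lemma rightList_drop (nums : List Int) (K j : Nat) (hKj : K < j) :
    (rightList nums K j).dropLast = rightList nums K (j - 1) := by
  unfold rightList
  rw [show j + 1 - K = (j - K) + 1 by omega, List.range'_1_concat]
  simp [show j - 1 + 1 - K = j - K by omega]

lemma rightList_K_dropLast (nums : List Int) (K : Nat) :
    (rightList nums K K).dropLast = [] := by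
  unfold rightList
  simp [show K + 1 - K = 1 by omega]

-- the main lemma: A's greedy two-pointer loop computes the rectangle maximum
lemma loopA_eq (nums : List Int) (K : Nat) :
    ∀ m : Nat, ∀ i j : Nat, K - i + (j - K) = m → i ≤ K → K ≤ j → ∀ res : Int, 0 ≤ res →
    loopA (leftList nums K i) (rightList nums K j) res (i : Int) (j : Int)
      = max res (max 0 (M nums K i j)) := by
  intro m
  induction m using Nat.strong_induction_on with
  | _ m IH =>
    intro i j hm hiK hKj res hres
    have hlne := leftList_ne nums K i hiK
    have hrne := rightList_ne nums K j hKj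
    rw [loopA, dif_pos ⟨hlne, hrne⟩, leftList_last nums K i hiK, rightList_last nums K j hKj]
    by_cases hab : lmin nums K i < rmin nums K j
    · rw [if_pos hab]
      have hiltK : i < K := by
        rcases (by omega : i < K ∨ i = K) with h | h
        · exact h
        · exfalso
          have h1 : lmin nums K i = nums.getD K 0 := by rw [h, lmin_K]
          have h2 : rmin nums K j ≤ nums.getD K 0 := rmin_le_base nums K j
          omega
      rw [leftList_drop nums K i hiK, show (i : Int) + 1 = ((i + 1 : Nat) : Int) by omega]
      rw [IH (K - (i + 1) + (j - K)) (by omega) (i + 1) j rfl (by omega) hKj _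
        (le_trans hres (le_max_left _ _))]
      have e1 : M nums K i j = max (colmax nums K i j) (M nums K (i + 1) j) := by
        rw [M, dif_pos hiltK]
      have e2 : score nums K i j ≤ colmax nums K i j := le_colmax nums K hKj (le_refl j)
      have e3 : colmax nums K i j ≤ max (score nums K i j) 0 :=
        colmax_le nums K hKj (fun j' h1 h2 => score_col_bound nums K hiK h1 h2 hab)
      rw [e1]
      rw [score] at e2 e3
      simp only [max_def] at e3 ⊢
      split_ifs at e3 ⊢ <;> omega
    · rw [if_neg hab]
      have hba : rmin nums K j ≤ lmin nums K i := not_lt.mp hab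
      by_cases hjK : K < j
      · rw [rightList_drop nums K j hjK, show (j : Int) - 1 = ((j - 1 : Nat) : Int) by omega]
        rw [IH (K - i + (j - 1 - K)) (by omega) i (j - 1) rfl hiK (by omega) _
          (le_trans hres (le_max_left _ _))]
        have e1 : M nums K i j = max (M nums K i (j - 1)) (rowmax nums K i j) :=
          M_split_row nums K hiK hjK
        have e2 : score nums K i j ≤ rowmax nums K i j := le_rowmax nums K (le_refl i) hiK
        have e3 : rowmax nums K i j ≤ max (score nums K i j) 0 :=
          rowmax_le nums K hiK (fun i' h1 h2 => score_row_bound nums K h1 h2 hKj hba)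
        rw [e1]
        rw [score] at e2 e3
        simp only [max_def] at e3 ⊢
        split_ifs at e3 ⊢ <;> omega
      · have he : j = K := by omega
        rw [he] at hba ⊢
        rw [rightList_K_dropLast nums K]
        rw [loopA, dif_neg (by simp)]
        have e2 : score nums K i K ≤ M nums K i K :=
          le_trans (le_colmax nums K (le_refl K) (le_refl K)) (le_M nums K (le_refl i) hiK)
        have e3 : M nums K i K ≤ max (score nums K i K) 0 := by
          refine M_le nums K hiK (fun i' h1 h2 => ?_)
          have ecol : colmax nums K i' K = score nums K i' K := by
            rw [colmax, dif_neg (lt_irrefl K)]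
          rw [ecol]
          exact score_row_bound nums K h1 h2 (le_refl K) hba
        rw [score] at e2 e3
        simp only [max_def] at e3 ⊢
        split_ifs at e3 ⊢ <;> omega

-- relating the ports to the abstract quantities
lemma pyget_cast (nums : List Int) (t : Nat) (h : t < nums.length) :
    (PySem.List.pyGet? nums (t : Int)).getD 0 = nums.getD t 0 := by
  rw [PySem.List.pyGet?_natCast, List.getElem?_eq_getElem h, Option.getD_some,
    List.getD_eq_getElem nums 0 h]

lemma foldl_min_init (a x : Int) (t : List Int) :
    t.foldl min (min a x) = min a (t.foldl min x) := by
  induction t generalizing x with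
  | nil => simp
  | cons y t ih =>
    simp only [List.foldl_cons]
    rw [min_assoc, ih]

lemma lmin_eq_fold (nums : List Int) (K : Nat) (hK : K < nums.length) :
    ∀ m : Nat, ∀ i : Nat, K - i = m → i ≤ K →
    ((nums.drop (i + 1)).take (K - i)).foldl min (nums.getD i 0) = lmin nums K i := by
  intro m
  induction m using Nat.strong_induction_on with
  | _ m IH =>
    intro i hm hiK
    by_cases hlt : i < K
    · have hi1 : i + 1 < nums.length := by omega
      have hg : nums.getD (i + 1) 0 = nums[i + 1] := List.getD_eq_getElem nums 0 hi1
      rw [List.drop_eq_getElem_cons hi1, show K - i = (K - (i + 1)) + 1 by omega,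
        List.take_succ_cons, List.foldl_cons, foldl_min_init, ← hg,
        IH (K - (i + 1)) (by omega) (i + 1) rfl (by omega)]
      have e : lmin nums K i = min (nums.getD i 0) (lmin nums K (i + 1)) := by
        rw [lmin, dif_pos hlt]
      rw [e]
    · have he : i = K := by omega
      rw [he, Nat.sub_self, List.take_zero, List.foldl_nil, lmin_K]

lemma lmin_succ_base (nums : List Int) (K : Nat) : lmin nums K (K + 1) = nums.getD K 0 := by
  rw [lmin, dif_neg (by omega : ¬ K + 1 < K)]

lemma lmin_step (nums : List Int) (K t : Nat) (ht : t ≤ K) :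
    min (lmin nums K (t + 1)) (nums.getD t 0) = lmin nums K t := by
  by_cases hlt : t < K
  · have e : lmin nums K t = min (nums.getD t 0) (lmin nums K (t + 1)) := by
      rw [lmin, dif_pos hlt]
    rw [e]
    exact min_comm _ _
  · have he : t = K := by omega
    rw [he, lmin_succ_base, lmin_K, min_self]

lemma leftList_concat (nums : List Int) (K t : Nat) (ht : t ≤ K) :
    leftList nums K (t + 1) ++ [lmin nums K t] = leftList nums K t := by
  unfold leftList
  rw [show K + 1 - t = (K - t) + 1 by omega, List.range'_succ, List.map_cons, List.reverse_cons,
    show K + 1 - (t + 1) = K - t by omega]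

lemma slice_min (nums : List Int) (K : Nat) (hK : K < nums.length) (i : Nat) (hiK : i ≤ K) :
    (PySem.List.min? (PySem.List.slice nums (some (i : Int)) (some ((K : Int) + 1)))
      (fun x => x)).getD 0 = lmin nums K i := by
  rw [show ((K : Int) + 1) = ((K + 1 : Nat) : Int) by omega, PySem.List.slice_natCast]
  have hi : i < nums.length := by omega
  have hg : nums.getD i 0 = nums[i] := List.getD_eq_getElem nums 0 hi
  rw [List.drop_eq_getElem_cons hi, show K + 1 - i = (K - i) + 1 by omega, List.take_succ_cons,
    PySem.List.min?_id_cons, Option.getD_some, ← hg,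
    lmin_eq_fold nums K hK (K - i) i rfl hiK]

lemma build_left (nums : List Int) (K : Nat) (hK : K < nums.length) :
    ∀ t : Nat, t ≤ K →
    (PySem.List.pyRange (t : Int) (-1) (-1)).foldl
      (fun (st : Int × List Int) i =>
        (min st.1 ((PySem.List.pyGet? nums i).getD 0),
         st.2 ++ [min st.1 ((PySem.List.pyGet? nums i).getD 0)]))
      (lmin nums K (t + 1), leftList nums K (t + 1))
    = (lmin nums K 0, leftList nums K 0) := by
  intro t
  induction t with
  | zero =>
    intro ht
    rw [PySem.List.pyRange_neg_one_cons (by omega : (-1 : Int) < ((0 : Nat) : Int))]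
    simp only [List.foldl_cons]
    rw [PySem.List.pyRange_neg_one_eq_nil (by omega : ((0 : Nat) : Int) - 1 ≤ -1), List.foldl_nil,
      pyget_cast nums 0 (by omega), lmin_step nums K 0 ht, leftList_concat nums K 0 ht]
  | succ t ih =>
    intro ht
    rw [PySem.List.pyRange_neg_one_cons (by omega : (-1 : Int) < ((t + 1 : Nat) : Int))]
    simp only [List.foldl_cons]
    rw [pyget_cast nums (t + 1) (by omega), lmin_step nums K (t + 1) ht,
      leftList_concat nums K (t + 1) ht,
      show ((t + 1 : Nat) : Int) - 1 = ((t : Nat) : Int) by omega]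
    exact ih (by omega)

lemma build_left_snd (nums : List Int) (K : Nat) (hK : K < nums.length) :
    ((PySem.List.pyRange (K : Int) (-1) (-1)).foldl
      (fun (st : Int × List Int) i =>
        (min st.1 ((PySem.List.pyGet? nums i).getD 0),
         st.2 ++ [min st.1 ((PySem.List.pyGet? nums i).getD 0)]))
      (nums.getD K 0, ([] : List Int))).2
    = leftList nums K 0 := by
  have h1 : nums.getD K 0 = lmin nums K (K + 1) := (lmin_succ_base nums K).symm
  have h2 : ([] : List Int) = leftList nums K (K + 1) := by
    unfold leftList
    rw [show K + 1 - (K + 1) = 0 by omega]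
    rfl
  rw [h1,
    show (lmin nums K (K + 1), ([] : List Int)) = (lmin nums K (K + 1), leftList nums K (K + 1))
      from by rw [h2],
    build_left nums K hK K (le_refl K)]

lemma rightList_K (nums : List Int) (K : Nat) : rightList nums K K = [nums.getD K 0] := by
  unfold rightList
  rw [show K + 1 - K = 1 by omega, show List.range' K 1 = [K] from rfl, List.map_cons,
    List.map_nil, rmin_K]

lemma rmin_step (nums : List Int) (K j : Nat) (hKj : K ≤ j) :
    min (rmin nums K j) (nums.getD (j + 1) 0) = rmin nums K (j + 1) := by
  have e : rmin nums K (j + 1) = min (rmin nums K (j + 1 - 1)) (nums.getD (j + 1) 0) := by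
    rw [rmin, dif_pos (by omega : K < j + 1)]
  rw [e, Nat.add_sub_cancel]

lemma rightList_concat (nums : List Int) (K j : Nat) (hKj : K ≤ j) :
    rightList nums K j ++ [rmin nums K (j + 1)] = rightList nums K (j + 1) := by
  unfold rightList
  rw [show j + 1 + 1 - K = (j + 1 - K) + 1 by omega, List.range'_1_concat, List.map_append,
    List.map_cons, List.map_nil, show K + (j + 1 - K) = j + 1 by omega]

lemma build_right (nums : List Int) (K : Nat) (_hK : K < nums.length) :
    ∀ j : Nat, K ≤ j → j < nums.length →
    (PySem.List.pyRange (K : Int) ((j : Int) + 1) 1).foldl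
      (fun (st : Int × List Int) i =>
        (min st.1 ((PySem.List.pyGet? nums i).getD 0),
         st.2 ++ [min st.1 ((PySem.List.pyGet? nums i).getD 0)]))
      (nums.getD K 0, ([] : List Int))
    = (rmin nums K j, rightList nums K j) := by
  intro j hKj
  induction j, hKj using Nat.le_induction with
  | base =>
    intro _
    rw [PySem.List.pyRange_one_singleton]
    simp only [List.foldl_cons, List.foldl_nil]
    rw [pyget_cast nums K (by omega), min_self, rightList_K, List.nil_append, rmin_K]
  | succ j hKj ih =>
    intro hlen
    have hj : j < nums.length := by omega
    rw [show ((j + 1 : Nat) : Int) = ((j : Nat) : Int) + 1 by omega,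
      PySem.List.pyRange_one_succ_right (by omega : (K : Int) ≤ (j : Int) + 1),
      List.foldl_append, ih hj]
    simp only [List.foldl_cons, List.foldl_nil]
    rw [show ((j : Nat) : Int) + 1 = ((j + 1 : Nat) : Int) by omega,
      pyget_cast nums (j + 1) (by omega), rmin_step nums K j hKj,
      rightList_concat nums K j hKj]

lemma build_right_snd (nums : List Int) (K : Nat) (hK : K < nums.length)
    (j : Nat) (h1 : K ≤ j) (h2 : j < nums.length) :
    ((PySem.List.pyRange (K : Int) ((j : Int) + 1) 1).foldl
      (fun (st : Int × List Int) i =>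
        (min st.1 ((PySem.List.pyGet? nums i).getD 0),
         st.2 ++ [min st.1 ((PySem.List.pyGet? nums i).getD 0)]))
      (nums.getD K 0, ([] : List Int))).2
    = rightList nums K j := by
  rw [build_right nums K hK j h1 h2]

-- B-side: the inner scan over j accumulates colmax
lemma inner_fold (nums : List Int) (K : Nat) (_hK : K < nums.length) (i : Nat) (_hiK : i ≤ K) :
    ∀ j : Nat, K ≤ j → j < nums.length → ∀ best : Int,
    (PySem.List.pyRange (K : Int) ((j : Int) + 1) 1).foldl
      (fun (st : Int × Int) jj =>
        (min st.1 ((PySem.List.pyGet? nums jj).getD 0),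
         max st.2 (min st.1 ((PySem.List.pyGet? nums jj).getD 0) * (jj - (i : Int) + 1))))
      (lmin nums K i, best)
    = (min (lmin nums K i) (rmin nums K j), max best (colmax nums K i j)) := by
  intro j hKj
  induction j, hKj using Nat.le_induction with
  | base =>
    intro _ best
    rw [PySem.List.pyRange_one_singleton]
    simp only [List.foldl_cons, List.foldl_nil]
    rw [pyget_cast nums K (by omega)]
    have e2 : colmax nums K i K = min (lmin nums K i) (nums.getD K 0) * ((K : Int) - (i : Int) + 1) := by
      have e : colmax nums K i K = score nums K i K := by
        rw [colmax, dif_neg (lt_irrefl K)]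
      rw [e, score, rmin_K, mul_comm]
    have e1 : min (lmin nums K i) (nums.getD K 0) = min (lmin nums K i) (rmin nums K K) := by
      rw [rmin_K]
    rw [← e2, e1]
  | succ j hKj ih =>
    intro hlen best
    have hj : j < nums.length := by omega
    rw [show ((j + 1 : Nat) : Int) = ((j : Nat) : Int) + 1 by omega,
      PySem.List.pyRange_one_succ_right (by omega : (K : Int) ≤ (j : Int) + 1),
      List.foldl_append, ih hj best]
    simp only [List.foldl_cons, List.foldl_nil]
    rw [show ((j : Nat) : Int) + 1 = ((j + 1 : Nat) : Int) by omega,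
      pyget_cast nums (j + 1) (by omega)]
    have er : min (min (lmin nums K i) (rmin nums K j)) (nums.getD (j + 1) 0)
        = min (lmin nums K i) (rmin nums K (j + 1)) := by
      rw [← rmin_step nums K j hKj, min_assoc]
    have ec : max (max best (colmax nums K i j))
        (min (min (lmin nums K i) (rmin nums K j)) (nums.getD (j + 1) 0) * (((j + 1 : Nat) : Int) - (i : Int) + 1))
        = max best (colmax nums K i (j + 1)) := by
      have e : colmax nums K i (j + 1) = max (colmax nums K i j) (score nums K i (j + 1)) := by
        rw [colmax, dif_pos (by omega : K < j + 1), Nat.add_sub_cancel]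
      have e2 : min (min (lmin nums K i) (rmin nums K j)) (nums.getD (j + 1) 0)
          * (((j + 1 : Nat) : Int) - (i : Int) + 1) = score nums K i (j + 1) := by
        rw [er, score, mul_comm]
      rw [e2, e, max_assoc]
    rw [ec, er]

-- B-side: the outer scan over i accumulates M
lemma outer_fold (nums : List Int) (K : Nat) (hK : K < nums.length) :
    ∀ m : Nat, ∀ i : Nat, K - i = m → i ≤ K → ∀ best : Int,
    (PySem.List.pyRange (i : Int) ((K : Int) + 1) 1).foldl
      (fun (best : Int) ii =>
        ((PySem.List.pyRange (K : Int) (((nums.length - 1 : Nat) : Int) + 1) 1).foldl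
          (fun (st : Int × Int) jj =>
            (min st.1 ((PySem.List.pyGet? nums jj).getD 0),
             max st.2 (min st.1 ((PySem.List.pyGet? nums jj).getD 0) * (jj - ii + 1))))
          ((PySem.List.min? (PySem.List.slice nums (some ii) (some ((K : Int) + 1)))
            (fun x => x)).getD 0, best)).2)
      best
    = max best (M nums K i (nums.length - 1)) := by
  intro m
  induction m using Nat.strong_induction_on with
  | _ m IH =>
    intro i hm hiK best
    rw [PySem.List.pyRange_one_cons (by omega : (i : Int) < (K : Int) + 1)]
    simp only [List.foldl_cons]
    rw [slice_min nums K hK i hiK,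
      inner_fold nums K hK i hiK (nums.length - 1) (by omega) (by omega) best]
    by_cases hlt : i < K
    · rw [show (i : Int) + 1 = ((i + 1 : Nat) : Int) by omega,
        IH (K - (i + 1)) (by omega) (i + 1) rfl (by omega) _]
      have e : M nums K i (nums.length - 1)
          = max (colmax nums K i (nums.length - 1)) (M nums K (i + 1) (nums.length - 1)) := by
        rw [M, dif_pos hlt]
      rw [e]
      show max (max best (colmax nums K i (nums.length - 1))) (M nums K (i + 1) (nums.length - 1)) = _
      rw [max_assoc]
    · have he : i = K := by omega
      rw [he, PySem.List.pyRange_one_eq_nil (le_refl ((K : Int) + 1)), List.foldl_nil]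
      have e : M nums K K (nums.length - 1) = colmax nums K K (nums.length - 1) := by
        rw [M, dif_neg (lt_irrefl K)]
      rw [e]

-- ===== VERDICT (by name: the statement is the Claim_ definition above) =====
theorem maximumScore_spec : Claim_equal_maximumScore := by
  unfold Claim_equal_maximumScore
  intro nums k _hdom hpre
  unfold Spec_maximumScore
  have hlb : -((nums.length : Nat) : Int) ≤ k := hpre.1
  have hub : k < ((nums.length : Nat) : Int) := hpre.2
  by_cases hk : 0 ≤ k
  · have hkeq : ((k.toNat : Nat) : Int) = k := Int.toNat_of_nonneg hk
    have hKlen : k.toNat < nums.length := by omega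
    rw [← hkeq]
    simp only [maximumScore, maximumScore_alt]
    rw [pyget_cast nums k.toNat hKlen,
      show ((nums.length : Nat) : Int) = ((nums.length - 1 : Nat) : Int) + 1 by omega,
      build_left_snd nums k.toNat hKlen,
      build_right_snd nums k.toNat hKlen (nums.length - 1) (by omega) (by omega),
      show (((nums.length - 1 : Nat) : Int) + 1) - 1 = ((nums.length - 1 : Nat) : Int) by ring]
    have hA := loopA_eq nums k.toNat (k.toNat - 0 + (nums.length - 1 - k.toNat)) 0
      (nums.length - 1) rfl (by omega) (by omega) 0 (le_refl 0)
    simp only [Nat.cast_zero] at hA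
    rw [hA]
    have hB := outer_fold nums k.toNat hKlen (k.toNat - 0) 0 rfl (by omega) 0
    simp only [Nat.cast_zero] at hB
    rw [hB, ← max_assoc, max_self]
  · have hk1 : k ≤ -1 := by omega
    simp only [maximumScore, maximumScore_alt]
    rw [PySem.List.pyRange_neg_one_eq_nil hk1,
      PySem.List.pyRange_one_eq_nil (by omega : k + 1 ≤ 0), List.foldl_nil, List.foldl_nil,
      loopA, dif_neg (by simp)]
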